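-- pv_equiv track=rewrite | github.com/CFLJacquet/twAIlight | Tests/Decompte_Repartition.py | dynamic_count
-- ===== SOURCE A (Python) =====
-- def dynamic_count(a, b):
--     """ Fonction conjecturée, en programmation dynamique, pour au plus a chaussettes
--
--     :param a: nombre de chaussette
--     :param b: nombre de tiroirs
--     :return: Nombre de configurations possibles
--     """
--     dict_res = {}
--     for i in range(1, a+ 1):
--         dict_res[(i, 1)] = 1
--     for j in range(2, b + 1):
--         dict_res[(1, j)] = j
--
--     for b_ in range(2, b + 1):
--         for a_ in range(2, a + 1):
--             dict_res[(a_, b_)] = dict_res[(a_ - 1, b_)] + dict_res[(a_, b_ - 1)]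
--     sum_c=0
--     for a_ in range(1,a+1):
--         sum_c+=dict_res[(a_,b)]
--
--     return sum_c
-- ===== SOURCE B (Python) =====
-- def dynamic_count(a, b):
--     """Closed form: each DP cell f(i, b) is the binomial coefficient C(i+b-1, i),
--     and the hockey-stick identity collapses the final sum to C(a+b, a) - 1."""
--     if a <= 0:
--         return 0
--     # build C(a+b, a) incrementally: after step k, num == C(b+k, k)
--     num = 1
--     for k in range(1, a + 1):
--         num = num * (b + k) // k
--     return num - 1
-- ===== Notes on version B (the rewrite author's own statement) =====
-- stated objective: faster
-- what changed: Replaced the O(a*b) dictionary DP (each cell is the binomial coefficient C(i+j-1,i)) by the hockey-stick closed form C(a+b,a)-1, computed with one multiplicative loop of length a.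
import Mathlib
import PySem

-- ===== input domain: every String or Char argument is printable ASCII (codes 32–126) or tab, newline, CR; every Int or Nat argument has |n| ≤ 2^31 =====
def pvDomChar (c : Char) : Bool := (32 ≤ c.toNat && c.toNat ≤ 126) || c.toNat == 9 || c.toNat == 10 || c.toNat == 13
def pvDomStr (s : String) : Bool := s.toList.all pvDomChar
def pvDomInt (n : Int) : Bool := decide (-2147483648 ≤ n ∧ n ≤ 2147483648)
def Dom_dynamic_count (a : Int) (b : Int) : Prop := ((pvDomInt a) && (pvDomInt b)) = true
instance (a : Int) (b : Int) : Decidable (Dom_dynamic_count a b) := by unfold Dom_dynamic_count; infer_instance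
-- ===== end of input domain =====

-- B replaces the dictionary DP by the hockey-stick closed form C(a+b,a)-1, one multiplicative loop of length a.

-- ===== PORT A =====
-- dict_res[…] on a missing key raises KeyError in Python; that is reachable only in the final sum loop,
-- when 1 ≤ a ∧ b < 1 (excluded by Pre_). Inside the DP loop the looked-up keys are always present, so
-- `getD … 0` is exact on every admitted input. dict_res is only ever read by key (never iterated), so a
-- hash map models Python's dict exactly here; the association-list Dict is too slow to evaluate.
def dynamic_count (a : Int) (b : Int) : Int :=
  let d : Std.HashMap (Int × Int) Int := ∅
  let d := (PySem.List.pyRange 1 (a + 1) 1).foldl (fun d i => d.insert (i, 1) 1) d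
  let d := (PySem.List.pyRange 2 (b + 1) 1).foldl (fun d j => d.insert (1, j) j) d
  let d := (PySem.List.pyRange 2 (b + 1) 1).foldl (fun d b_ =>
    (PySem.List.pyRange 2 (a + 1) 1).foldl (fun d a_ =>
      d.insert (a_, b_) (d.getD (a_ - 1, b_) 0 + d.getD (a_, b_ - 1) 0)) d) d
  (PySem.List.pyRange 1 (a + 1) 1).foldl (fun sum_c a_ => sum_c + d.getD (a_, b) 0) 0

-- ===== PORT B =====
def dynamic_count_alt (a : Int) (b : Int) : Int :=
  if a ≤ 0 then 0
  else
    let num := (PySem.List.pyRange 1 (a + 1) 1).foldl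
      (fun num k => PySem.Int.floordiv (num * (b + k)) k) 1
    num - 1

-- ===== PRECONDITION & SPEC =====
-- Pre_ excludes exactly the inputs where A raises KeyError: 1 ≤ a with b < 1 (the sum loop reads key (a_, b)).
def Pre_dynamic_count (a : Int) (b : Int) : Prop := 1 ≤ a → 1 ≤ b
instance (a : Int) (b : Int) : Decidable (Pre_dynamic_count a b) := by unfold Pre_dynamic_count; infer_instance
def pvWitness_dynamic_count : Int × Int := (3, 2)

def Spec_dynamic_count (a : Int) (b : Int) (out : Int) : Prop := out = dynamic_count_alt a b
instance (a : Int) (b : Int) (out : Int) : Decidable (Spec_dynamic_count a b out) := by unfold Spec_dynamic_count; infer_instance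

-- ===== CLAIM (what is proved, stated in full; the proofs are below) =====
def Claim_equal_dynamic_count : Prop := ∀ (a : Int) (b : Int), Dom_dynamic_count a b → Pre_dynamic_count a b → Spec_dynamic_count a b (dynamic_count a b)

-- ===== LEMMAS AND PROOFS =====

-- Std.HashMap.getD_insert with the comparison as a propositional `if` (LawfulBEq on Int × Int)
lemma hm_getD_insert (m : Std.HashMap (Int × Int) Int) (k a : Int × Int) (v f : Int) :
    (m.insert k v).getD a f = if a = k then v else m.getD a f := by
  rw [Std.HashMap.getD_insert]
  by_cases h : a = k
  · subst h; simp
  · simp [h, Ne.symm h]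

-- the mathematical value of DP cell (i, j): C(i+j-1, i)
def pvC (i j : Int) : Int := ((i + j - 1).toNat.choose i.toNat : Int)

lemma pvC_one_right {i : Int} (hi : 1 ≤ i) : pvC i 1 = 1 := by
  unfold pvC
  have h : (i + 1 - 1).toNat = i.toNat := by omega
  rw [h, Nat.choose_self]
  rfl

lemma pvC_one_left {j : Int} (hj : 1 ≤ j) : pvC 1 j = j := by
  unfold pvC
  have h1 : ((1 : Int) + j - 1).toNat = j.toNat := by omega
  have h2 : ((1 : Int)).toNat = 1 := rfl
  rw [h1, h2, Nat.choose_one_right]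
  omega

lemma pvC_pascal {i j : Int} (hi : 2 ≤ i) (hj : 2 ≤ j) :
    pvC (i - 1) j + pvC i (j - 1) = pvC i j := by
  obtain ⟨p, rfl⟩ : ∃ p : ℕ, i = (p : Int) + 2 := ⟨(i - 2).toNat, by omega⟩
  obtain ⟨q, rfl⟩ : ∃ q : ℕ, j = (q : Int) + 2 := ⟨(j - 2).toNat, by omega⟩
  unfold pvC
  have e1 : ((p : Int) + 2 - 1 + ((q : Int) + 2) - 1).toNat = p + q + 2 := by omega
  have e2 : ((p : Int) + 2 - 1).toNat = p + 1 := by omega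
  have e3 : ((p : Int) + 2 + ((q : Int) + 2 - 1) - 1).toNat = p + q + 2 := by omega
  have e4 : ((p : Int) + 2).toNat = p + 2 := by omega
  have e5 : ((p : Int) + 2 + ((q : Int) + 2) - 1).toNat = p + q + 3 := by omega
  rw [e1, e2, e3, e4, e5]
  have key : (p + q + 3).choose (p + 2) = (p + q + 2).choose (p + 1) + (p + q + 2).choose (p + 2) := by
    simpa using Nat.choose_succ_succ (p + q + 2) (p + 1)
  rw [key]
  push_cast
  ring

-- model of the dict during the DP: the entries written before outer iteration B / inner index A'
def pvModel (a b B A' : Int) (q : Int × Int) : Int :=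
  if 1 ≤ q.1 ∧ q.1 ≤ a ∧ q.2 = 1 then 1
  else if q.1 = 1 ∧ 2 ≤ q.2 ∧ q.2 ≤ b then q.2
  else if 2 ≤ q.1 ∧ q.1 ≤ a ∧ 2 ≤ q.2 ∧ (q.2 < B ∨ (q.2 = B ∧ q.1 < A')) then pvC q.1 q.2
  else 0

lemma pvModel_mk (a b B A' i j : Int) :
    pvModel a b B A' (i, j)
      = if 1 ≤ i ∧ i ≤ a ∧ j = 1 then 1
        else if i = 1 ∧ 2 ≤ j ∧ j ≤ b then j
        else if 2 ≤ i ∧ i ≤ a ∧ 2 ≤ j ∧ (j < B ∨ (j = B ∧ i < A')) then pvC i j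
        else 0 := rfl

lemma pv_loop1 (n : ℕ) (d : Std.HashMap (Int × Int) Int) (q : Int × Int) :
    ((PySem.List.pyRange 1 ((n : Int) + 1) 1).foldl (fun d i => d.insert (i, (1 : Int)) 1) d).getD q 0
      = if 1 ≤ q.1 ∧ q.1 ≤ (n : Int) ∧ q.2 = 1 then 1 else d.getD q 0 := by
  induction n with
  | zero =>
    rw [show ((0 : ℕ) : Int) + 1 = 1 by norm_num, PySem.List.pyRange_one_eq_nil (by omega)]
    simp only [List.foldl_nil]
    split_ifs with h
    · exfalso; omega
    · rfl
  | succ k ih =>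
    rw [show (((k + 1 : ℕ)) : Int) + 1 = ((k : Int) + 1) + 1 by push_cast; ring,
        PySem.List.pyRange_one_succ_right (by omega), List.foldl_append]
    simp only [List.foldl_cons, List.foldl_nil]
    rw [hm_getD_insert, ih]
    obtain ⟨i, j⟩ := q
    simp only [Prod.mk.injEq]
    split_ifs <;> first | rfl | (exfalso; omega)

lemma pv_loop2 (n : ℕ) (d : Std.HashMap (Int × Int) Int) (q : Int × Int) :
    ((PySem.List.pyRange 2 ((n : Int) + 2) 1).foldl (fun d j => d.insert ((1 : Int), j) j) d).getD q 0
      = if q.1 = 1 ∧ 2 ≤ q.2 ∧ q.2 ≤ (n : Int) + 1 then q.2 else d.getD q 0 := by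
  induction n with
  | zero =>
    rw [show ((0 : ℕ) : Int) + 2 = 2 by norm_num, PySem.List.pyRange_one_eq_nil (by omega)]
    simp only [List.foldl_nil]
    split_ifs with h
    · exfalso; omega
    · rfl
  | succ k ih =>
    rw [show (((k + 1 : ℕ)) : Int) + 2 = ((k : Int) + 2) + 1 by push_cast; ring,
        PySem.List.pyRange_one_succ_right (by omega), List.foldl_append]
    simp only [List.foldl_cons, List.foldl_nil]
    rw [hm_getD_insert, ih]
    obtain ⟨i, j⟩ := q
    simp only [Prod.mk.injEq]
    split_ifs <;> first | rfl | (exfalso; omega) | omega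

lemma pv_model_rec (a b B A : Int) (h2A : 2 ≤ A) (hAa : A ≤ a) (h2B : 2 ≤ B) (hBb : B ≤ b) :
    pvModel a b B A (A - 1, B) + pvModel a b B A (A, B - 1) = pvC A B := by
  have h1 : pvModel a b B A (A - 1, B) = pvC (A - 1) B := by
    rw [pvModel_mk]
    by_cases hA2 : A = 2
    · subst hA2
      rw [if_neg (by omega), if_pos (by omega), show (2 : Int) - 1 = 1 by norm_num,
          pvC_one_left (by omega)]
    · rw [if_neg (by omega), if_neg (by omega), if_pos (by omega)]
  have h2 : pvModel a b B A (A, B - 1) = pvC A (B - 1) := by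
    rw [pvModel_mk]
    by_cases hB2 : B = 2
    · subst hB2
      rw [if_pos (by omega), show (2 : Int) - 1 = 1 by norm_num, pvC_one_right (by omega)]
    · rw [if_neg (by omega), if_neg (by omega), if_pos (by omega)]
  rw [h1, h2, pvC_pascal h2A h2B]

lemma pv_model_step (a b B A : Int) (h2A : 2 ≤ A) (hAa : A ≤ a) (h2B : 2 ≤ B) (hBb : B ≤ b)
    (q : Int × Int) :
    (if q = (A, B) then pvC A B else pvModel a b B A q) = pvModel a b B (A + 1) q := by
  obtain ⟨i, j⟩ := q
  by_cases hq : (i, j) = (A, B)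
  · rw [Prod.mk.injEq] at hq
    obtain ⟨rfl, rfl⟩ := hq
    rw [if_pos rfl, pvModel_mk, if_neg (by omega), if_neg (by omega), if_pos (by omega)]
  · rw [if_neg hq, pvModel_mk, pvModel_mk]
    rw [Prod.mk.injEq] at hq
    split_ifs <;> first | rfl | (exfalso; omega)

lemma pv_model_next (a b B : Int) (_ha : 1 ≤ a) (q : Int × Int) :
    pvModel a b B (a + 1) q = pvModel a b (B + 1) 2 q := by
  obtain ⟨i, j⟩ := q
  rw [pvModel_mk, pvModel_mk]
  split_ifs <;> first | rfl | (exfalso; omega)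

lemma pv_dp_inner (a b B : Int) (_ha : 1 ≤ a) (h2B : 2 ≤ B) (hBb : B ≤ b)
    (n : ℕ) (hn : (n : Int) + 1 ≤ a)
    (d : Std.HashMap (Int × Int) Int) (hd : ∀ q, d.getD q 0 = pvModel a b B 2 q) :
    ∀ q, ((PySem.List.pyRange 2 ((n : Int) + 2) 1).foldl
        (fun d a_ => d.insert (a_, B) (d.getD (a_ - 1, B) 0 + d.getD (a_, B - 1) 0)) d).getD q 0
      = pvModel a b B ((n : Int) + 2) q := by
  induction n with
  | zero =>
    intro q
    rw [show ((0 : ℕ) : Int) + 2 = 2 by norm_num, PySem.List.pyRange_one_eq_nil (by omega)]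
    simp only [List.foldl_nil]
    exact hd q
  | succ k ih =>
    intro q
    rw [show (((k + 1 : ℕ)) : Int) + 2 = ((k : Int) + 2) + 1 by push_cast; ring,
        PySem.List.pyRange_one_succ_right (by omega), List.foldl_append]
    simp only [List.foldl_cons, List.foldl_nil]
    have ihq := ih (by omega)
    rw [hm_getD_insert]
    simp only [ihq]
    rw [pv_model_rec a b B ((k : Int) + 2) (by omega) (by omega) h2B hBb]
    rw [pv_model_step a b B ((k : Int) + 2) (by omega) (by omega) h2B hBb q,
        show (k : Int) + 2 + 1 = ((k + 1 : ℕ) : Int) + 2 by push_cast; ring]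

lemma pv_dp_outer (a b : Int) (ha : 1 ≤ a) (m : ℕ) (hm : (m : Int) + 1 ≤ b)
    (d : Std.HashMap (Int × Int) Int) (hd : ∀ q, d.getD q 0 = pvModel a b 2 2 q) :
    ∀ q, ((PySem.List.pyRange 2 ((m : Int) + 2) 1).foldl (fun d b_ =>
        (PySem.List.pyRange 2 (a + 1) 1).foldl
          (fun d a_ => d.insert (a_, b_) (d.getD (a_ - 1, b_) 0 + d.getD (a_, b_ - 1) 0)) d) d).getD q 0
      = pvModel a b ((m : Int) + 2) 2 q := by
  induction m with
  | zero =>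
    intro q
    rw [show ((0 : ℕ) : Int) + 2 = 2 by norm_num,
        show PySem.List.pyRange 2 (2 : Int) 1 = [] from PySem.List.pyRange_one_eq_nil (by omega)]
    simp only [List.foldl_nil]
    exact hd q
  | succ k ih =>
    intro q
    rw [show (((k + 1 : ℕ)) : Int) + 2 = ((k : Int) + 2) + 1 by push_cast; ring,
        show PySem.List.pyRange 2 (((k : Int) + 2) + 1) 1
            = PySem.List.pyRange 2 ((k : Int) + 2) 1 ++ [(k : Int) + 2] from
          PySem.List.pyRange_one_succ_right (by omega),
        List.foldl_append]
    simp only [List.foldl_cons, List.foldl_nil]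
    -- inner loop over the full range 2 .. a+1, starting from the state after k outer iterations
    have hstate := ih (by omega)
    have hinner := pv_dp_inner a b ((k : Int) + 2) ha (by omega) (by omega)
      (a - 1).toNat (by omega) _ hstate
    rw [show (((a - 1).toNat : Int)) + 2 = a + 1 by omega] at hinner
    rw [hinner q, pv_model_next a b ((k : Int) + 2) ha q,
        show (k : Int) + 2 + 1 = ((k + 1 : ℕ) : Int) + 2 by push_cast; ring]

lemma pv_sum (n : ℕ) (b : Int) (hb : 1 ≤ b) :
    (PySem.List.pyRange 1 ((n : Int) + 1) 1).foldl (fun s i => s + pvC i b) 0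
      = ((b.toNat + n).choose n : Int) - 1 := by
  induction n with
  | zero =>
    rw [show ((0 : ℕ) : Int) + 1 = 1 by norm_num, PySem.List.pyRange_one_eq_nil (by omega)]
    simp
  | succ k ih =>
    rw [show (((k + 1 : ℕ)) : Int) + 1 = ((k : Int) + 1) + 1 by push_cast; ring,
        PySem.List.pyRange_one_succ_right (by omega), List.foldl_append]
    simp only [List.foldl_cons, List.foldl_nil]
    rw [ih]
    have hc : pvC ((k : Int) + 1) b = ((b.toNat + k).choose (k + 1) : Int) := by
      unfold pvC
      have e1 : ((k : Int) + 1 + b - 1).toNat = b.toNat + k := by omega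
      have e2 : ((k : Int) + 1).toNat = k + 1 := by omega
      rw [e1, e2]
    rw [hc]
    have key : (b.toNat + (k + 1)).choose (k + 1)
        = (b.toNat + k).choose k + (b.toNat + k).choose (k + 1) := by
      simpa [show b.toNat + (k + 1) = (b.toNat + k) + 1 by omega] using
        Nat.choose_succ_succ (b.toNat + k) k
    rw [key]
    push_cast
    ring

lemma pv_bloop (n : ℕ) (b : Int) (hb : 1 ≤ b) :
    (PySem.List.pyRange 1 ((n : Int) + 1) 1).foldl
        (fun num k => PySem.Int.floordiv (num * (b + k)) k) 1
      = ((b.toNat + n).choose n : Int) := by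
  induction n with
  | zero =>
    rw [show ((0 : ℕ) : Int) + 1 = 1 by norm_num, PySem.List.pyRange_one_eq_nil (by omega)]
    simp
  | succ k ih =>
    rw [show (((k + 1 : ℕ)) : Int) + 1 = ((k : Int) + 1) + 1 by push_cast; ring,
        PySem.List.pyRange_one_succ_right (by omega), List.foldl_append]
    simp only [List.foldl_cons, List.foldl_nil]
    rw [ih]
    have e1 : b + ((k : Int) + 1) = ((b.toNat + (k + 1) : ℕ) : Int) := by omega
    have e2 : ((k : Int) + 1) = (((k + 1 : ℕ)) : Int) := by push_cast; ring
    rw [e1, e2, show ((b.toNat + k).choose k : Int) * ((b.toNat + (k + 1) : ℕ) : Int)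
        = (((b.toNat + k).choose k * (b.toNat + (k + 1)) : ℕ) : Int) by push_cast; ring,
      PySem.Int.floordiv_natCast]
    have key : (b.toNat + k).choose k * (b.toNat + (k + 1))
        = (b.toNat + (k + 1)).choose (k + 1) * (k + 1) := by
      have := Nat.add_one_mul_choose_eq (b.toNat + k) k
      simpa [Nat.succ_eq_add_one, show b.toNat + k + 1 = b.toNat + (k + 1) by omega,
        Nat.mul_comm] using this
    rw [key, Nat.mul_div_cancel _ (by omega : 0 < k + 1)]

lemma pv_model_final (a b i : Int) (hb : 1 ≤ b) (h1 : 1 ≤ i) (h2 : i ≤ a) :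
    pvModel a b (b + 1) 2 (i, b) = pvC i b := by
  rw [pvModel_mk]
  by_cases hb1 : b = 1
  · subst hb1
    rw [if_pos (by omega)]
    exact (pvC_one_right h1).symm
  · by_cases hi1 : i = 1
    · subst hi1
      rw [if_neg (by omega), if_pos (by omega)]
      exact (pvC_one_left hb).symm
    · rw [if_neg (by omega), if_neg (by omega), if_pos (by omega)]

-- ===== VERDICT (by name: the statement is the Claim_ definition above) =====
theorem dynamic_count_spec : Claim_equal_dynamic_count := by
  intro a b _ hpre
  unfold Spec_dynamic_count dynamic_count dynamic_count_alt
  dsimp only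
  by_cases ha : a ≤ 0
  · rw [if_pos ha,
        show PySem.List.pyRange 1 (a + 1) 1 = [] from PySem.List.pyRange_one_eq_nil (by omega)]
    rfl
  · rw [if_neg ha]
    have ha1 : 1 ≤ a := by omega
    have hb1 : 1 ≤ b := hpre ha1
    -- base dict after the first two loops equals the model at stage (2, 2)
    have hbase : ∀ q,
        ((PySem.List.pyRange 2 (b + 1) 1).foldl (fun d j => d.insert ((1 : Int), j) j)
          ((PySem.List.pyRange 1 (a + 1) 1).foldl (fun d i => d.insert (i, (1 : Int)) 1)
            (∅ : Std.HashMap (Int × Int) Int))).getD q 0 = pvModel a b 2 2 q := by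
      intro q
      rw [show a + 1 = ((a.toNat : Int)) + 1 by omega,
          show b + 1 = (((b - 1).toNat : Int)) + 2 by omega, pv_loop2, pv_loop1]
      obtain ⟨i, j⟩ := q
      rw [pvModel_mk, Std.HashMap.getD_empty]
      split_ifs <;> first | rfl | (exfalso; omega)
    -- after the DP double loop the dict equals the model at stage (b + 1, 2)
    have hdp := pv_dp_outer a b ha1 (b - 1).toNat (by omega) _ hbase
    rw [show (((b - 1).toNat : Int)) + 2 = b + 1 by omega] at hdp
    -- the final sum loop reads cell (a_, b) = C(a_ + b - 1, a_); hockey-stick on both sides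
    refine Eq.trans (PySem.List.foldl_congr_mem _ _ (fun s i => s + pvC i b) 0 ?_) ?_
    · intro acc x hx
      rw [PySem.List.mem_pyRange_one] at hx
      dsimp only
      rw [hdp (x, b), pv_model_final a b x hb1 (by omega) (by omega)]
    · rw [show a + 1 = ((a.toNat : Int)) + 1 by omega, pv_sum a.toNat b hb1,
          pv_bloop a.toNat b hb1]
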